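-- pv_equiv track=rewrite | github.com/Sporgelum/PorcineBTMs_Methods | workingEnvironment/03_network/MINE_NETWORK_PERMUTATION_FILTER_MCODE_ANNOTATED/mine_network/mcode.py | _membership_from_modules
-- ===== SOURCE A (Python) =====
-- def _membership_from_modules(modules: dict) -> dict:
--     """Assign each gene to the largest module it belongs to."""
--     gene_to_modules = {}
--     for mid_id, genes in modules.items():
--         for g in genes:
--             gene_to_modules.setdefault(g, []).append((len(genes), mid_id))
--     return {
--         g: max(entries, key=lambda x: x[0])[1]
--         for g, entries in gene_to_modules.items()
--     }
-- ===== SOURCE B (Python) =====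
-- def _membership_from_modules(modules: dict) -> dict:
--     """Assign each gene to the largest module it belongs to.
--
--     Two staged passes: collect genes in first-appearance order, then for
--     each gene scan the modules once for its largest container (first
--     maximal in module order, as Python's max keeps the first)."""
--     items = list(modules.items())
--     order = []
--     for _, genes in items:
--         for g in genes:
--             if g not in order:
--                 order.append(g)
--     result = {}
--     for g in order:
--         best_size, best_mid = 0, ""
--         for mid, genes in items:
--             if g in genes and best_size < len(genes):
--                 best_size, best_mid = len(genes), mid
--         result[g] = best_mid
--     return result
-- ===== Notes on version B (the rewrite author's own statement) =====
-- stated objective: alternative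
-- what changed: B does two staged passes - first collect the genes in first-appearance order, then for each gene scan the modules for its largest container with a running (size, id) maximum - instead of grouping (size, id) entry lists per gene in a dict and max-reducing each list in a comprehension.
import Mathlib
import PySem

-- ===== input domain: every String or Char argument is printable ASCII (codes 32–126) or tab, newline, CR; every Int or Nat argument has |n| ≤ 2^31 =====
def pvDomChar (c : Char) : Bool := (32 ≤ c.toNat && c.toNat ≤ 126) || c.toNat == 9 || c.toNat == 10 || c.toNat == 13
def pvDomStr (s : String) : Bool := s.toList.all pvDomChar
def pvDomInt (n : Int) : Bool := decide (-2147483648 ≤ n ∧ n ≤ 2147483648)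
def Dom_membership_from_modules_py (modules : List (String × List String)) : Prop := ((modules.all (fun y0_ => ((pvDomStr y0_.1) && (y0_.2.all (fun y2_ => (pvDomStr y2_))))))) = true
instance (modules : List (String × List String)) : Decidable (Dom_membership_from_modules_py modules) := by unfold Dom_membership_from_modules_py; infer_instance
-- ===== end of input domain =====

-- B replaces A's per-gene entry-list dict + max-reduction comprehension by two staged passes:
-- genes in first-appearance order, then a per-gene running-maximum scan over the modules
-- (objective: alternative decomposition; not faster).

-- ===== PORT A =====
-- gene_to_modules.setdefault(g, []).append((len(genes), mid_id))
def pvAddGene (mid : String) (size : Int) (d : PySem.Dict String (List (Int × String))) (g : String) :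
    PySem.Dict String (List (Int × String)) :=
  d.insert g (d.getD g [] ++ [(size, mid)])

def pvGtm (modules : List (String × List String)) : PySem.Dict String (List (Int × String)) :=
  modules.foldl (fun d p => p.2.foldl (pvAddGene p.1 (PySem.List.len p.2)) d) PySem.Dict.empty

def membership_from_modules_py (modules : List (String × List String)) : List (String × String) :=
  -- {g: max(entries, key=lambda x: x[0])[1] for g, entries in gene_to_modules.items()}
  -- (max? = none is Python's ValueError on an empty sequence; unreachable here, the loop skips it)
  ((pvGtm modules).items.foldl
    (fun r q =>
      match PySem.List.max? q.2 (fun x => x.1) with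
      | some m => r.insert q.1 m.2
      | none => r)
    PySem.Dict.empty).items

-- ===== PORT B =====
-- for _, genes in items: for g in genes: if g not in order: order.append(g)
def pvCollect : List String → List String → List String
  | ord, [] => ord
  | ord, g :: gs => if ord.contains g then pvCollect ord gs else pvCollect (ord ++ [g]) gs

def pvOrderRec : List String → List (String × List String) → List String
  | ord, [] => ord
  | ord, p :: ps => pvOrderRec (pvCollect ord p.2) ps

-- for mid, genes in items: if g in genes and best_size < len(genes): best_size, best_mid = len(genes), mid
def pvScan (g : String) : (Int × String) → List (String × List String) → Int × String
  | b, [] => b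
  | b, p :: ps =>
      pvScan g (if p.2.contains g && b.1 < PySem.List.len p.2 then (PySem.List.len p.2, p.1) else b) ps

-- for g in order: result[g] = best_mid
def pvEmit (modules : List (String × List String)) :
    PySem.Dict String String → List String → PySem.Dict String String
  | r, [] => r
  | r, g :: gs => pvEmit modules (r.insert g (pvScan g (0, "") modules).2) gs

def membership_from_modules_py_alt (modules : List (String × List String)) : List (String × String) :=
  (pvEmit modules PySem.Dict.empty (pvOrderRec [] modules)).items

-- ===== PRECONDITION & SPEC =====
def Spec_membership_from_modules_py (modules : List (String × List String)) (out : List (String × String)) : Prop := out = membership_from_modules_py_alt modules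
instance (modules : List (String × List String)) (out : List (String × String)) : Decidable (Spec_membership_from_modules_py modules out) := by unfold Spec_membership_from_modules_py; infer_instance

-- ===== CLAIM (what is proved, stated in full; the proofs are below) =====
def Claim_equal_membership_from_modules_py : Prop := ∀ (modules : List (String × List String)), Dom_membership_from_modules_py modules → Spec_membership_from_modules_py modules (membership_from_modules_py modules)

-- ===== LEMMAS AND PROOFS =====

-- proof-side foldl forms of B's recursions, with bridges
def pvOrder (modules : List (String × List String)) : List String :=
  modules.foldl (fun ord p => p.2.foldl (fun ord g => if ord.contains g then ord else ord ++ [g]) ord) []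

def pvBestOf (g : String) (modules : List (String × List String)) : Int × String :=
  modules.foldl
    (fun b p => if p.2.contains g && b.1 < PySem.List.len p.2 then (PySem.List.len p.2, p.1) else b)
    (0, "")

theorem pvCollect_eq_foldl (gs ord : List String) :
    pvCollect ord gs = gs.foldl (fun ord g => if ord.contains g then ord else ord ++ [g]) ord := by
  induction gs generalizing ord with
  | nil => rfl
  | cons g gs ih =>
    rw [pvCollect, List.foldl_cons]
    by_cases h : ord.contains g = true
    · rw [if_pos h, ih, if_pos h]
    · rw [if_neg h, ih, if_neg h]

theorem pvOrderRec_eq_foldl (ms : List (String × List String)) (ord : List String) :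
    pvOrderRec ord ms
      = ms.foldl (fun ord p => p.2.foldl (fun ord g => if ord.contains g then ord else ord ++ [g]) ord) ord := by
  induction ms generalizing ord with
  | nil => rfl
  | cons p ps ih => rw [pvOrderRec, List.foldl_cons, ih, pvCollect_eq_foldl]

theorem pvScan_eq_foldl (g : String) (ms : List (String × List String)) (b : Int × String) :
    pvScan g b ms
      = ms.foldl
          (fun b p => if p.2.contains g && b.1 < PySem.List.len p.2 then (PySem.List.len p.2, p.1) else b) b := by
  induction ms generalizing b with
  | nil => rfl
  | cons p ps ih => rw [pvScan, List.foldl_cons, ih]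

theorem pvEmit_eq_foldl (modules : List (String × List String)) (l : List String)
    (r : PySem.Dict String String) :
    pvEmit modules r l = l.foldl (fun r g => r.insert g (pvBestOf g modules).2) r := by
  induction l generalizing r with
  | nil => rfl
  | cons g gs ih => rw [pvEmit, List.foldl_cons, ih, pvBestOf, pvScan_eq_foldl]

-- Python's max(·, key=fst) step, and its value on a nonempty list (first maximal element).
def pvStep (b x : Int × String) : Int × String := if b.1 < x.1 then x else b

def pvFmax : List (Int × String) → (Int × String)
  | [] => (0, "")
  | x :: t => t.foldl pvStep x

theorem pvFoldAux (f : Option (Int × String) → (Int × String) → Option (Int × String))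
    (hf : ∀ m z, f (some m) z = some (pvStep m z)) :
    ∀ (t : List (Int × String)) (m : Int × String), t.foldl f (some m) = some (t.foldl pvStep m) := by
  intro t
  induction t with
  | nil => intro m; rfl
  | cons z t ih => intro m; rw [List.foldl_cons, hf, List.foldl_cons]; exact ih (pvStep m z)

theorem pvMax?_eq (es : List (Int × String)) (h : es ≠ []) :
    PySem.List.max? es (fun x => x.1) = some (pvFmax es) := by
  cases es with
  | nil => exact absurd rfl h
  | cons x t =>
    exact pvFoldAux _ (fun m z => by by_cases hmz : m.1 < z.1 <;> simp [pvStep, hmz]) t x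

-- The entry list A accumulates for gene g: one (len genes, mid) per occurrence of g.
def pvEntries (g : String) (modules : List (String × List String)) : List (Int × String) :=
  (modules.map (fun p => List.replicate (p.2.count g) (PySem.List.len p.2, p.1))).flatten

theorem pvGetD_inner (mid : String) (size : Int) (genes : List String)
    (d : PySem.Dict String (List (Int × String))) (g : String) :
    (genes.foldl (pvAddGene mid size) d).getD g []
      = d.getD g [] ++ List.replicate (genes.count g) (size, mid) := by
  induction genes generalizing d with
  | nil => simp
  | cons g' gs ih =>
    rw [List.foldl_cons, ih]
    unfold pvAddGene
    rw [PySem.Dict.getD_insert]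
    by_cases h : g = g'
    · subst h
      simp [List.replicate_succ, List.append_assoc]
    · have hb : (g' == g) = false := by simp [Ne.symm h]
      simp [h, List.count_cons, hb]

theorem pvGetD_gtm (modules : List (String × List String)) (g : String) :
    (pvGtm modules).getD g [] = pvEntries g modules := by
  suffices H : ∀ (ms : List (String × List String)) (d : PySem.Dict String (List (Int × String))),
      (ms.foldl (fun d p => p.2.foldl (pvAddGene p.1 (PySem.List.len p.2)) d) d).getD g []
        = d.getD g [] ++ pvEntries g ms by
    simpa [pvGtm] using H modules PySem.Dict.empty
  intro ms
  induction ms with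
  | nil => intro d; simp [pvEntries]
  | cons p ps ih =>
    intro d
    rw [List.foldl_cons, ih, pvGetD_inner]
    simp [pvEntries, List.append_assoc]

theorem pvOrder_inner (genes ord : List String) :
    genes.foldl (fun ord g => if ord.contains g then ord else ord ++ [g]) ord
      = PySem.Set.update ord genes := by
  induction genes generalizing ord with
  | nil => rfl
  | cons g gs ih =>
    rw [List.foldl_cons, PySem.Set.update_cons, ← ih]
    rfl

theorem pvOrder_eq (modules : List (String × List String)) :
    pvOrder modules = modules.foldl (fun ord p => PySem.Set.update ord p.2) [] := by
  unfold pvOrder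
  exact PySem.List.foldl_congr_mem _ _ _ _ (fun ord p _ => pvOrder_inner p.2 ord)

theorem pvKeys_gtm (modules : List (String × List String)) :
    (pvGtm modules).keys = pvOrder modules := by
  rw [pvOrder_eq]
  suffices H : ∀ (ms : List (String × List String)) (d : PySem.Dict String (List (Int × String))),
      (ms.foldl (fun d p => p.2.foldl (pvAddGene p.1 (PySem.List.len p.2)) d) d).keys
        = ms.foldl (fun ord p => PySem.Set.update ord p.2) d.keys by
    simpa [pvGtm] using H modules PySem.Dict.empty
  intro ms
  induction ms with
  | nil => intro d; rfl
  | cons p ps ih =>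
    intro d
    rw [List.foldl_cons, ih, List.foldl_cons]
    have : (p.2.foldl (pvAddGene p.1 (PySem.List.len p.2)) d).keys = PySem.Set.update d.keys p.2 := by
      exact PySem.Dict.keys_foldl_insert p.2 (fun d x => d.getD x [] ++ [(PySem.List.len p.2, p.1)]) d
    rw [this]

theorem pvOrder_nodup (modules : List (String × List String)) : (pvOrder modules).Nodup := by
  rw [pvOrder_eq]
  suffices H : ∀ (ms : List (String × List String)) (ord : List String), ord.Nodup →
      (ms.foldl (fun ord p => PySem.Set.update ord p.2) ord).Nodup from
    H modules [] List.nodup_nil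
  intro ms
  induction ms with
  | nil => intro ord h; exact h
  | cons p ps ih => intro ord h; exact ih _ (PySem.Set.nodup_update ord p.2 h)

theorem pvOrder_mem (modules : List (String × List String)) (g : String)
    (h : g ∈ pvOrder modules) : ∃ p ∈ modules, g ∈ p.2 := by
  rw [pvOrder_eq] at h
  suffices H : ∀ (ms : List (String × List String)) (ord : List String),
      g ∈ ms.foldl (fun ord p => PySem.Set.update ord p.2) ord → g ∈ ord ∨ ∃ p ∈ ms, g ∈ p.2 by
    rcases H modules [] h with h' | h'
    · exact absurd h' (List.not_mem_nil)
    · exact h'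
  intro ms
  induction ms with
  | nil => intro ord h'; exact Or.inl h'
  | cons p ps ih =>
    intro ord h'
    rcases ih _ h' with h'' | ⟨q, hq, hgq⟩
    · rcases (PySem.Set.mem_update ord p.2 g).mp h'' with h3 | h3
      · exact Or.inl h3
      · exact Or.inr ⟨p, List.mem_cons_self .., h3⟩
    · exact Or.inr ⟨q, List.mem_cons_of_mem _ hq, hgq⟩

theorem pvEntries_sizes (g : String) (modules : List (String × List String)) :
    ∀ x ∈ pvEntries g modules, 1 ≤ x.1 := by
  intro x hx
  obtain ⟨l, hl, hxl⟩ := List.mem_flatten.mp hx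
  obtain ⟨p, hp, hlp⟩ := List.mem_map.mp hl
  rw [← hlp] at hxl
  obtain ⟨hn, hx⟩ := List.mem_replicate.mp hxl
  subst hx
  have hcnt : p.2.count g ≠ 0 := hn
  have hmem : g ∈ p.2 := by
    by_contra hgm
    exact hcnt (List.count_eq_zero.mpr hgm)
  have : 1 ≤ p.2.length := List.length_pos_of_mem hmem
  simp only [PySem.List.len_eq]
  omega

theorem pvEntries_ne_nil (g : String) (modules : List (String × List String))
    (h : g ∈ pvOrder modules) : pvEntries g modules ≠ [] := by
  obtain ⟨p, hp, hgp⟩ := pvOrder_mem modules g h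
  have hcnt : 0 < p.2.count g := List.count_pos_iff.mpr hgp
  have hmem : (PySem.List.len p.2, p.1) ∈ pvEntries g modules := by
    apply List.mem_flatten.mpr
    refine ⟨List.replicate (p.2.count g) (PySem.List.len p.2, p.1), List.mem_map.mpr ⟨p, hp, rfl⟩, ?_⟩
    exact List.mem_replicate.mpr ⟨by omega, rfl⟩
  exact List.ne_nil_of_mem hmem

theorem pvStep_idem (b x : Int × String) : pvStep (pvStep b x) x = pvStep b x := by
  unfold pvStep
  by_cases h : b.1 < x.1 <;> simp [h]

theorem pvStep_replicate (b x : Int × String) (n : ℕ) :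
    (List.replicate n x).foldl pvStep b = if n = 0 then b else pvStep b x := by
  induction n generalizing b with
  | zero => rfl
  | succ m ih =>
    rw [List.replicate_succ, List.foldl_cons, ih, if_neg (Nat.succ_ne_zero m)]
    split_ifs with hm
    · rfl
    · exact pvStep_idem b x

theorem pvBestOf_eq_fold (g : String) (modules : List (String × List String)) :
    pvBestOf g modules = (pvEntries g modules).foldl pvStep (0, "") := by
  suffices H : ∀ (ms : List (String × List String)) (b : Int × String),
      ms.foldl
        (fun b p => if p.2.contains g && b.1 < PySem.List.len p.2 then (PySem.List.len p.2, p.1) else b) b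
        = (pvEntries g ms).foldl pvStep b from H modules (0, "")
  intro ms
  induction ms with
  | nil => intro b; rfl
  | cons p ps ih =>
    intro b
    rw [List.foldl_cons, ih]
    have hE : pvEntries g (p :: ps)
        = List.replicate (p.2.count g) (PySem.List.len p.2, p.1) ++ pvEntries g ps := by
      simp [pvEntries]
    rw [hE, List.foldl_append]
    congr 1
    rw [pvStep_replicate]
    by_cases hm : g ∈ p.2
    · have hc : p.2.contains g = true := by simpa using hm
      have hn : p.2.count g ≠ 0 := by
        have := List.count_pos_iff.mpr hm; omega
      rw [if_neg hn]
      simp [pvStep, hm]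
    · have hn : p.2.count g = 0 := List.count_eq_zero.mpr hm
      simp [hm, hn]

theorem pvBestOf_eq_fmax (g : String) (modules : List (String × List String))
    (h : g ∈ pvOrder modules) : pvBestOf g modules = pvFmax (pvEntries g modules) := by
  rw [pvBestOf_eq_fold]
  have hne := pvEntries_ne_nil g modules h
  have hsz := pvEntries_sizes g modules
  obtain ⟨x, t, hes⟩ : ∃ x t, pvEntries g modules = x :: t := by
    cases hE : pvEntries g modules with
    | nil => exact absurd hE hne
    | cons x t => exact ⟨x, t, rfl⟩
  have hx : 1 ≤ x.1 := hsz x (by rw [hes]; exact List.mem_cons_self ..)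
  rw [hes, List.foldl_cons]
  have h0 : pvStep (0, "") x = x := by
    unfold pvStep
    rw [if_pos]
    show (0 : Int) < x.1
    omega
  rw [h0]
  rfl

-- ===== VERDICT (by name: the statement is the Claim_ definition above) =====
theorem membership_from_modules_py_spec : Claim_equal_membership_from_modules_py := by
  intro modules _
  show membership_from_modules_py modules = membership_from_modules_py_alt modules
  have hnd : (pvGtm modules).keys.Nodup := by rw [pvKeys_gtm]; exact pvOrder_nodup modules
  have hval : ∀ q ∈ (pvGtm modules).items, q.2 = pvEntries q.1 modules := by
    intro q hq
    have := PySem.Dict.getD_of_mem_items (pvGtm modules) (by exact hq) hnd []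
    rw [← this, pvGetD_gtm]
  have hkeymem : ∀ q ∈ (pvGtm modules).items, q.1 ∈ pvOrder modules := by
    intro q hq
    rw [← pvKeys_gtm]
    exact PySem.Dict.mem_keys_of_mem_items (pvGtm modules) hq
  have hne : ∀ q ∈ (pvGtm modules).items, q.2 ≠ [] := by
    intro q hq
    rw [hval q hq]
    exact pvEntries_ne_nil q.1 modules (hkeymem q hq)
  unfold membership_from_modules_py membership_from_modules_py_alt
  rw [pvEmit_eq_foldl, pvOrderRec_eq_foldl, ← pvOrder]
  -- A side: the match-fold is an insert-fold over nonempty entry lists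
  have hA1 :
      (pvGtm modules).items.foldl
        (fun r q =>
          match PySem.List.max? q.2 (fun x => x.1) with
          | some m => r.insert q.1 m.2
          | none => r)
        PySem.Dict.empty
      = (pvGtm modules).items.foldl
          (fun r q => r.insert q.1 (pvFmax q.2).2) PySem.Dict.empty :=
    PySem.List.foldl_congr_mem _ _ _ _ (fun r q hq => by rw [pvMax?_eq q.2 (hne q hq)])
  rw [hA1,
    PySem.Dict.items_foldl_insert_fresh (pvGtm modules).items (fun q => q.1)
      (fun q => (pvFmax q.2).2) PySem.Dict.empty
      (fun a _ => by simp [PySem.Dict.empty, PySem.Dict.contains]) hnd,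
    PySem.Dict.items_foldl_insert_fresh (pvOrder modules) (fun g => g)
      (fun g => (pvBestOf g modules).2) PySem.Dict.empty
      (fun a _ => by simp [PySem.Dict.empty, PySem.Dict.contains])
      (by simpa using pvOrder_nodup modules)]
  simp only [PySem.Dict.empty, List.nil_append]
  -- both sides are maps over the same key list
  rw [PySem.Dict.items_eq_map_keys (pvGtm modules) hnd []]
  rw [List.map_map, pvKeys_gtm]
  refine List.map_congr_left (fun g hg => ?_)
  simp only [Function.comp_def]
  rw [PySem.Dict.getD_eq_get?_getD]
  have : (pvGtm modules).getD g [] = pvEntries g modules := pvGetD_gtm modules g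
  rw [PySem.Dict.getD_eq_get?_getD] at this
  rw [this, pvBestOf_eq_fmax g modules hg]
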